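-- pv_equiv track=rewrite | github.com/Abhishek7861/Machine-Coding-Solutions | 2048_Game/Utility.py | coverBoard
-- ===== SOURCE A (Python) =====
-- def coverBoard(board):
--     newBoard = []
--     for i in range(len(board[0])):
--         row = []
--         for j in range(len(board[0])):
--             row.append("-")
--         newBoard.append(row)
--
--     done = False
--     for i in range(len(board[0])):
--         count = 0
--         for j in range(len(board[0])):
--             if board[i][j] != "-":
--                 newBoard[i][count] = board[i][j]
--                 if j != count:
--                     done = True
--                 count += 1
--     return newBoard, done
-- ===== SOURCE B (Python) =====
-- def coverBoard(board):
--     n = len(board[0])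
--     newBoard = []
--     done = False
--     for i in range(n):
--         orig = [board[i][j] for j in range(n)]
--         # stable sort: non-dash cells keep their order and move left, dashes sink to the end
--         newBoard.append(sorted(orig, key=lambda c: c == "-"))
--         if not done:
--             seenDash = False
--             for c in orig:
--                 if c == "-":
--                     seenDash = True
--                 elif seenDash:
--                     done = True
--                     break
--     return newBoard, done
-- ===== Notes on version B (the rewrite author's own statement) =====
-- stated objective: alternative
-- what changed: Each row is rearranged by a stable library sort on the boolean key (cell == '-') instead of A's index-tracked in-place placement into a pre-built dash grid, and movement is detected by scanning each row for a dash occurring before a non-dash cell instead of comparing the running placement index with the column index.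
import Mathlib
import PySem

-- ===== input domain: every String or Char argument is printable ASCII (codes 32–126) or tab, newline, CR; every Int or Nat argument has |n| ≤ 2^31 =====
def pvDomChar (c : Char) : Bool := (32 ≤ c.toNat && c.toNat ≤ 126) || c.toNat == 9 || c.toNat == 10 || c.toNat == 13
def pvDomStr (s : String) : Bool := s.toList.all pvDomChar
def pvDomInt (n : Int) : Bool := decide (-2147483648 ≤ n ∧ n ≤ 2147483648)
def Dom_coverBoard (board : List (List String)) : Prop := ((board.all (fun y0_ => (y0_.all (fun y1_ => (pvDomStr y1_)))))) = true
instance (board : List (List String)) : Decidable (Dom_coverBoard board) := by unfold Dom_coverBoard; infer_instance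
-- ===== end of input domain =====

-- B replaces A's in-place index-tracked placement into a pre-built dash grid by a stable sort of each
-- row on the boolean key (cell == '-') plus a separate dash-before-value scan for the 'done' flag
-- (objective: alternative).

-- ===== PORT A =====
-- inner loop body: 'if board[i][j] != "-": newBoard[i][count] = board[i][j]; if j != count: done = True; count += 1'
-- state s = (count, newBoard, done)
def coverBoard.innerStep (board : List (List String)) (i : Nat)
    (s : Nat × List (List String) × Bool) (j : Nat) : Nat × List (List String) × Bool :=
  if (board.getD i []).getD j "" ≠ "-" then
    (s.1 + 1,
     s.2.1.set i ((s.2.1.getD i []).set s.1 ((board.getD i []).getD j "")),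
     s.2.2 || decide (j ≠ s.1))
  else s

-- one outer iteration: the inner loop over j with count reset to 0
def coverBoard.outerStep (board : List (List String)) (n : Nat)
    (st : List (List String) × Bool) (i : Nat) : List (List String) × Bool :=
  let r := (List.range n).foldl (coverBoard.innerStep board i) (0, st.1, st.2)
  (r.2.1, r.2.2)

def coverBoard (board : List (List String)) : List (List String) × Bool :=
  let n := (board.headD []).length
  -- build newBoard as n rows of n dashes, by appending as A does
  let newBoard := (List.range n).foldl
    (fun nb _ => nb ++ [(List.range n).foldl (fun row _ => row ++ ["-"]) []]) []
  (List.range n).foldl (coverBoard.outerStep board n) (newBoard, false)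

-- ===== PORT B =====
-- the 'for c in orig: if c == "-": seenDash = True; elif seenDash: done = True; break' scan
def coverBoard_alt.moved : List String → Bool → Bool
  | [], _ => false
  | c :: l, seen =>
    if c = "-" then coverBoard_alt.moved l true
    else if seen then true else coverBoard_alt.moved l seen

-- one row: orig = [board[i][j] for j in range(n)]; newBoard.append(sorted(orig, key=lambda c: c == "-"));
-- if not done: scan orig for a dash before a non-dash
def coverBoard_alt.step (board : List (List String)) (n : Nat)
    (st : List (List String) × Bool) (i : Nat) : List (List String) × Bool :=
  let orig := (List.range n).map (fun j => (board.getD i []).getD j "")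
  (st.1 ++ [PySem.List.sorted orig (fun c => c == "-")],
   if st.2 then st.2 else coverBoard_alt.moved orig false)

def coverBoard_alt (board : List (List String)) : List (List String) × Bool :=
  let n := (board.headD []).length
  (List.range n).foldl (coverBoard_alt.step board n) ([], false)

-- ===== PRECONDITION & SPEC =====
-- Pre_ excludes exactly the boards on which Python A raises IndexError: the empty board, boards with
-- fewer than len(board[0]) rows, and boards whose first len(board[0]) rows are shorter than len(board[0]).
def Pre_coverBoard (board : List (List String)) : Prop :=
  board ≠ [] ∧ (board.headD []).length ≤ board.length ∧
    ∀ r ∈ board.take (board.headD []).length, (board.headD []).length ≤ r.length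
instance (board : List (List String)) : Decidable (Pre_coverBoard board) := by
  unfold Pre_coverBoard; infer_instance
def pvWitness_coverBoard : List (List String) := [["2", "-"], ["-", "4"]]

def Spec_coverBoard (board : List (List String)) (out : List (List String) × Bool) : Prop := out = coverBoard_alt board
instance (board : List (List String)) (out : List (List String) × Bool) : Decidable (Spec_coverBoard board out) := by unfold Spec_coverBoard; infer_instance

-- ===== CLAIM (what is proved, stated in full; the proofs are below) =====
def Claim_equal_coverBoard : Prop := ∀ (board : List (List String)), Dom_coverBoard board → Pre_coverBoard board → Spec_coverBoard board (coverBoard board)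

-- ===== LEMMAS AND PROOFS =====

-- 'done' contribution of the remaining cells l when j - count = d so far
def pvContrib : Nat → List String → Bool
  | _, [] => false
  | d, c :: l => if c = "-" then pvContrib (d + 1) l else (decide (d ≠ 0) || pvContrib d l)

lemma pvContrib_pos (l : List String) : ∀ d : Nat, d ≠ 0 →
    pvContrib d l = l.any (fun c => decide (c ≠ "-")) := by
  induction l with
  | nil => intro d _; rfl
  | cons c l ih =>
    intro d hd
    by_cases hc : c = "-"
    · rw [show pvContrib d (c :: l) = pvContrib (d + 1) l from by simp [pvContrib, hc],
        ih _ (Nat.succ_ne_zero d)]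
      simp [hc]
    · rw [show pvContrib d (c :: l) = (decide (d ≠ 0) || pvContrib d l) from by
        simp [pvContrib, hc]]
      simp [hc, hd]

-- B's scan with seenDash already true is 'any non-dash left'
lemma pvMoved_true (l : List String) :
    coverBoard_alt.moved l true = l.any (fun c => decide (c ≠ "-")) := by
  induction l with
  | nil => rfl
  | cons c l ih =>
    by_cases hc : c = "-" <;> simp [coverBoard_alt.moved, hc, ih]

-- B's scan computes A's 'done' contribution of a fresh row
lemma pvMoved_false (l : List String) :
    coverBoard_alt.moved l false = pvContrib 0 l := by
  induction l with
  | nil => rfl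
  | cons c l ih =>
    by_cases hc : c = "-"
    · simp [coverBoard_alt.moved, pvContrib, hc, pvMoved_true, pvContrib_pos l 1 one_ne_zero]
    · simp [coverBoard_alt.moved, pvContrib, hc, ih]

-- inserting into a (non-dash block ++ dash block) partition keeps the partition
lemma pvInsertBy_part (x : String) (A B : List String)
    (hA : ∀ a ∈ A, a ≠ "-") (hB : ∀ b ∈ B, b = "-") :
    PySem.List.insertBy (fun a b => decide ((a == "-") < (b == "-"))) x (A ++ B) =
      if x = "-" then A ++ (B ++ [x]) else (A ++ [x]) ++ B := by
  induction A with
  | nil =>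
    cases B with
    | nil => by_cases hx : x = "-" <;> simp [PySem.List.insertBy, hx]
    | cons b B' =>
      have hb : b = "-" := hB b List.mem_cons_self
      by_cases hx : x = "-"
      · have : ((x == "-") < (b == "-")) = False := by simp [hx, hb]
        simp only [List.nil_append, PySem.List.insertBy, this, decide_false,
          Bool.false_eq_true, if_false, if_pos hx]
        rw [show PySem.List.insertBy (fun a b => decide ((a == "-") < (b == "-"))) x B' =
            PySem.List.insertBy (fun a b => decide ((a == "-") < (b == "-"))) x ([] ++ B') from rfl]
        rw [pvInsertBy_part x [] B' (by intro a ha; cases ha) (fun b hb' => hB b (List.mem_cons_of_mem _ hb'))]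
        simp [hx]
      · have : ((x == "-") < (b == "-")) = True := by
          simp [hx, hb, Bool.lt_iff]
        simp [PySem.List.insertBy, this, hx]
  | cons a A' ih =>
    have ha : a ≠ "-" := hA a List.mem_cons_self
    have : ((x == "-") < (a == "-")) = False := by simp [ha, Bool.lt_iff]
    simp only [List.cons_append, PySem.List.insertBy, this, decide_false,
      Bool.false_eq_true, if_false]
    rw [ih (fun a' ha' => hA a' (List.mem_cons_of_mem _ ha'))]
    by_cases hx : x = "-" <;> simp [hx]

-- the insertion-sort fold partitions xs into (non-dash cells, dash cells), stably
lemma pvSortFold_part (xs : List String) : ∀ (A B : List String),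
    (∀ a ∈ A, a ≠ "-") → (∀ b ∈ B, b = "-") →
    xs.foldl (fun acc x =>
        PySem.List.insertBy (fun a b => decide ((a == "-") < (b == "-"))) x acc) (A ++ B) =
      (A ++ xs.filter (fun c => decide (c ≠ "-"))) ++ (B ++ xs.filter (fun c => c == "-")) := by
  induction xs with
  | nil => intro A B _ _; simp
  | cons x xs ih =>
    intro A B hA hB
    rw [List.foldl_cons, pvInsertBy_part x A B hA hB]
    by_cases hx : x = "-"
    · rw [if_pos hx, show A ++ (B ++ [x]) = A ++ (B ++ [x]) from rfl]
      rw [ih A (B ++ [x]) hA (by intro b hb; rcases List.mem_append.mp hb with h | h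
                                 · exact hB b h
                                 · simpa using (List.mem_singleton.mp h).trans hx)]
      simp [hx]
    · rw [if_neg hx, ih (A ++ [x]) B
        (by intro a ha; rcases List.mem_append.mp ha with h | h
            · exact hA a h
            · rw [List.mem_singleton.mp h]; exact hx) hB]
      simp [hx]

-- the two filters of a row split its length
lemma pvFilter_len (xs : List String) : (xs.filter (fun c => decide (c ≠ "-"))).length +
    (xs.filter (fun c => c == "-")).length = xs.length := by
  induction xs with
  | nil => rfl
  | cons c l ihl =>
    by_cases hc : c = "-" <;> simp [hc] at ihl ⊢ <;> omega

-- sorted(row, key=lambda c: c == "-") is the non-dash cells followed by the dashes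
lemma pvSorted_eq (xs : List String) :
    PySem.List.sorted xs (fun c => c == "-") =
      xs.filter (fun c => decide (c ≠ "-")) ++
        List.replicate (xs.length - (xs.filter (fun c => decide (c ≠ "-"))).length) "-" := by
  rw [PySem.List.sorted_eq_foldl_insertBy]
  have h := pvSortFold_part xs [] [] (by intro a ha; cases ha) (by intro b hb; cases hb)
  simp only [List.nil_append] at h
  rw [h]
  have hmem : ∀ b ∈ xs.filter (fun c => c == "-"), b = "-" := by
    intro b hb; simpa using (List.mem_filter.mp hb).2
  have hrep := List.eq_replicate_of_mem hmem
  have hlen := pvFilter_len xs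
  rw [hrep, show xs.length - (xs.filter (fun c => decide (c ≠ "-"))).length =
      (xs.filter (fun c => c == "-")).length from by omega]

lemma pvGetD_append_cons (t l' : List String) (c : String) :
    (t ++ c :: l').getD t.length "" = c := by
  simp [List.getD_eq_getElem?_getD]

lemma pvGetD_set_self (nb : List (List String)) (i : Nat) (x : List String) (hi : i < nb.length) :
    (nb.set i x).getD i [] = x := by
  simp [List.getD_eq_getElem?_getD, hi]

lemma pvSet_boundary {α : Type} (acc : List α) (m : Nat) (x y : α) :
    (acc ++ List.replicate (m + 1) x).set acc.length y = (acc ++ [y]) ++ List.replicate m x := by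
  rw [List.set_append]
  simp [List.replicate_succ]

lemma pvSet_same {α : Type} (acc : List α) (m : Nat) (x : α) :
    (acc ++ List.replicate (m + 1) x).set acc.length x = acc ++ List.replicate (m + 1) x := by
  rw [pvSet_boundary]
  simp [List.replicate_succ]

-- invariant of A's inner loop: after consuming prefix t, count = |filter t|, row i of the
-- board equals (filter t) padded with dashes, and done has absorbed the moves seen so far
lemma pv_inner_loop (board : List (List String)) (i : Nat) (nb0 : List (List String))
    (orig : List String) (hi : i < nb0.length)
    (hr : ∀ j, j < orig.length → (board.getD i []).getD j "" = orig.getD j "") :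
    ∀ (l t : List String) (done : Bool), t ++ l = orig →
    (List.range' t.length l.length).foldl (coverBoard.innerStep board i)
      ((t.filter (fun c => decide (c ≠ "-"))).length,
       nb0.set i ((t.filter (fun c => decide (c ≠ "-"))) ++
         List.replicate (orig.length - (t.filter (fun c => decide (c ≠ "-"))).length) "-"),
       done)
    = ((orig.filter (fun c => decide (c ≠ "-"))).length,
       nb0.set i ((orig.filter (fun c => decide (c ≠ "-"))) ++
         List.replicate (orig.length - (orig.filter (fun c => decide (c ≠ "-"))).length) "-"),
       done || pvContrib (t.length - (t.filter (fun c => decide (c ≠ "-"))).length) l) := by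
  intro l
  induction l with
  | nil =>
    intro t done ht
    rw [List.append_nil] at ht
    subst ht
    simp [pvContrib]
  | cons c l' ih =>
    intro t done ht
    have hfl : (t.filter (fun c => decide (c ≠ "-"))).length ≤ t.length :=
      List.length_filter_le _ _
    have hlt : t.length < orig.length := by rw [← ht]; simp
    have hc0 : (board.getD i []).getD t.length "" = c := by
      rw [hr _ hlt, ← ht]; exact pvGetD_append_cons t l' c
    simp only [List.length_cons]
    rw [List.range'_succ, List.foldl_cons]
    by_cases hc : c = "-"
    · have hstep : coverBoard.innerStep board i
          ((t.filter (fun c => decide (c ≠ "-"))).length,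
           nb0.set i ((t.filter (fun c => decide (c ≠ "-"))) ++
             List.replicate (orig.length - (t.filter (fun c => decide (c ≠ "-"))).length) "-"),
           done) t.length
          = ((t.filter (fun c => decide (c ≠ "-"))).length,
             nb0.set i ((t.filter (fun c => decide (c ≠ "-"))) ++
               List.replicate (orig.length - (t.filter (fun c => decide (c ≠ "-"))).length) "-"),
             done) := by
        simp only [coverBoard.innerStep]
        rw [hc0]
        rw [if_neg (by simp [hc])]
      rw [hstep]
      have hfc : (t ++ [c]).filter (fun c => decide (c ≠ "-")) =
          t.filter (fun c => decide (c ≠ "-")) := by simp [hc]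
      have hkey := ih (t ++ [c]) done (by rw [← ht]; simp)
      rw [hfc] at hkey
      simp only [List.length_append, List.length_cons, List.length_nil, Nat.zero_add] at hkey
      rw [hkey, hc]
      have harr : t.length + 1 - (List.filter (fun c => decide (c ≠ "-")) t).length
          = t.length - (List.filter (fun c => decide (c ≠ "-")) t).length + 1 := by omega
      rw [harr, show pvContrib (t.length - (List.filter (fun c => decide (c ≠ "-")) t).length)
          ("-" :: l')
          = pvContrib (t.length - (List.filter (fun c => decide (c ≠ "-")) t).length + 1) l' from by
          simp [pvContrib]]
    · have hrep : orig.length - (t.filter (fun c => decide (c ≠ "-"))).length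
          = (orig.length - ((t.filter (fun c => decide (c ≠ "-"))).length + 1)) + 1 := by omega
      rw [hrep]
      have hstep : coverBoard.innerStep board i
          ((t.filter (fun c => decide (c ≠ "-"))).length,
           nb0.set i ((t.filter (fun c => decide (c ≠ "-"))) ++
             List.replicate ((orig.length - ((t.filter (fun c => decide (c ≠ "-"))).length + 1)) + 1) "-"),
           done) t.length
          = ((t.filter (fun c => decide (c ≠ "-"))).length + 1,
             nb0.set i ((t.filter (fun c => decide (c ≠ "-")) ++ [c]) ++
               List.replicate (orig.length - ((t.filter (fun c => decide (c ≠ "-"))).length + 1)) "-"),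
             done || decide (t.length ≠ (t.filter (fun c => decide (c ≠ "-"))).length)) := by
        simp only [coverBoard.innerStep, hc0]
        rw [if_pos hc]
        rw [pvGetD_set_self _ _ _ hi, List.set_set]
        have := pvSet_boundary (t.filter (fun c => decide (c ≠ "-")))
          (orig.length - ((t.filter (fun c => decide (c ≠ "-"))).length + 1)) "-" c
        rw [this]
      rw [hstep]
      have hfc : (t ++ [c]).filter (fun c => decide (c ≠ "-")) =
          t.filter (fun c => decide (c ≠ "-")) ++ [c] := by simp [hc]
      have hkey := ih (t ++ [c])
        (done || decide (t.length ≠ (t.filter (fun c => decide (c ≠ "-"))).length))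
        (by rw [← ht]; simp)
      rw [hfc] at hkey
      simp only [List.length_append, List.length_cons, List.length_nil, Nat.zero_add] at hkey
      rw [hkey]
      rw [show pvContrib (t.length - (List.filter (fun c => decide (c ≠ "-")) t).length) (c :: l')
          = (decide (t.length - (List.filter (fun c => decide (c ≠ "-")) t).length ≠ 0) ||
             pvContrib (t.length - (List.filter (fun c => decide (c ≠ "-")) t).length) l') from by
          simp [pvContrib, hc]]
      have h1 : t.length + 1 - ((List.filter (fun c => decide (c ≠ "-")) t).length + 1)
          = t.length - (List.filter (fun c => decide (c ≠ "-")) t).length := by omega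
      have h2 : decide (t.length ≠ (List.filter (fun c => decide (c ≠ "-")) t).length)
          = decide (t.length - (List.filter (fun c => decide (c ≠ "-")) t).length ≠ 0) :=
        decide_eq_decide.mpr (by omega)
      rw [h1, h2, Bool.or_assoc]

-- A's dash-grid builder
lemma pv_grid (n : Nat) :
    (List.range n).foldl
      (fun nb _ => nb ++ [(List.range n).foldl (fun row _ => row ++ ["-"]) []]) [] =
    List.replicate n (List.replicate n "-") := by
  rw [PySem.List.foldl_append_singleton_eq_map]
  simp [List.map_const']

-- outer loop: A's fold with the dash-padded accumulator equals B's fold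
lemma pv_outer_loop (board : List (List String)) (n : Nat) :
    ∀ (m : Nat) (acc : List (List String)) (done : Bool), acc.length + m = n →
    (List.range' acc.length m).foldl (coverBoard.outerStep board n)
      (acc ++ List.replicate m (List.replicate n "-"), done)
    = (List.range' acc.length m).foldl (coverBoard_alt.step board n) (acc, done) := by
  intro m
  induction m with
  | zero => intro acc done _; simp
  | succ m ih =>
    intro acc done hmn
    rw [List.range'_succ, List.foldl_cons, List.foldl_cons]
    set orig : List String :=
      (List.range n).map (fun j => (board.getD acc.length []).getD j "") with horig
    have hlen : orig.length = n := by simp [horig]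
    have hr : ∀ j, j < orig.length → (board.getD acc.length []).getD j "" = orig.getD j "" := by
      intro j hj
      rw [hlen] at hj
      simp [horig, List.getD_eq_getElem?_getD, List.getElem?_map, List.getElem?_range hj]
    have hi : acc.length < (acc ++ List.replicate (m + 1) (List.replicate n "-")).length := by
      simp
    have hinner := pv_inner_loop board acc.length
      (acc ++ List.replicate (m + 1) (List.replicate n "-")) orig hi hr orig [] done (by simp)
    simp only [List.filter_nil, List.length_nil, List.nil_append, Nat.sub_zero] at hinner
    rw [hlen, pvSet_same] at hinner
    have hstepA : coverBoard.outerStep board n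
        (acc ++ List.replicate (m + 1) (List.replicate n "-"), done) acc.length
        = ((acc ++ [orig.filter (fun c => decide (c ≠ "-")) ++
              List.replicate (n - (orig.filter (fun c => decide (c ≠ "-"))).length) "-"]) ++
            List.replicate m (List.replicate n "-"),
           done || pvContrib 0 orig) := by
      simp only [coverBoard.outerStep, List.range_eq_range']
      rw [hinner]
      rw [pvSet_boundary]
    rw [hstepA]
    have hstepB : coverBoard_alt.step board n (acc, done) acc.length
        = (acc ++ [orig.filter (fun c => decide (c ≠ "-")) ++
             List.replicate (n - (orig.filter (fun c => decide (c ≠ "-"))).length) "-"],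
           done || pvContrib 0 orig) := by
      simp only [coverBoard_alt.step, ← horig]
      rw [pvSorted_eq orig, hlen, pvMoved_false]
      cases done <;> simp
    rw [hstepB]
    have hkey := ih (acc ++ [orig.filter (fun c => decide (c ≠ "-")) ++
        List.replicate (n - (orig.filter (fun c => decide (c ≠ "-"))).length) "-"])
      (done || pvContrib 0 orig) (by simp; omega)
    simp only [List.length_append, List.length_cons, List.length_nil] at hkey
    exact hkey

-- ===== VERDICT (by name: the statement is the Claim_ definition above) =====
theorem coverBoard_spec : Claim_equal_coverBoard := by
  intro board _ _
  show coverBoard board = coverBoard_alt board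
  simp only [coverBoard, coverBoard_alt]
  rw [pv_grid, List.range_eq_range']
  have h := pv_outer_loop board (board.headD []).length (board.headD []).length [] false (by simp)
  simpa using h
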